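-- pv_equiv track=rewrite | github.com/wzygxr/shuati | class008_LinkedListAndBigNumberAddition/AddTwoNumbers.py | good_array
-- ===== SOURCE A (Python) =====
-- from typing import List, Optional
--
-- def good_array(arr: List[int]) -> List[int]:
--     result = []
--     if not arr:
--         return result
--
--     # 计算总和
--     total_sum = sum(arr)
--
--     # 找到最大值和次大值
--     max1 = float('-inf')
--     max2 = float('-inf')
--
--     for num in arr:
--         if num > max1:
--             max2 = max1
--             max1 = num
--         elif num > max2:
--             max2 = num
--
--     # 检查每个元素
--     for i, num in enumerate(arr):
--         remaining_sum = total_sum - num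
--         max_element = max2 if num == max1 else max1
--
--         if remaining_sum == 2 * max_element:
--             result.append(i + 1)  # 1-based索引
--
--     return result
-- ===== SOURCE B (Python) =====
-- def good_array(arr):
--     total = sum(arr)
--     n = len(arr)
--     NEG = float('-inf')
--     suffix = [NEG] * (n + 1)          # suffix[i] = max(arr[i:]), NEG past the end
--     for i in range(n - 1, -1, -1):
--         suffix[i] = max(arr[i], suffix[i + 1])
--     result = []
--     prefix = NEG                      # max of elements strictly before i
--     for i, num in enumerate(arr):
--         m = max(prefix, suffix[i + 1])
--         if total - num == 2 * m:
--             result.append(i + 1)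
--         prefix = max(prefix, num)
--     return result
-- ===== Notes on version B (the rewrite author's own statement) =====
-- stated objective: alternative
-- what changed: replaces the global top-two-maximum trick with a suffix-max table plus a running prefix-max, computing the max of the remaining elements per index directly
import Mathlib
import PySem

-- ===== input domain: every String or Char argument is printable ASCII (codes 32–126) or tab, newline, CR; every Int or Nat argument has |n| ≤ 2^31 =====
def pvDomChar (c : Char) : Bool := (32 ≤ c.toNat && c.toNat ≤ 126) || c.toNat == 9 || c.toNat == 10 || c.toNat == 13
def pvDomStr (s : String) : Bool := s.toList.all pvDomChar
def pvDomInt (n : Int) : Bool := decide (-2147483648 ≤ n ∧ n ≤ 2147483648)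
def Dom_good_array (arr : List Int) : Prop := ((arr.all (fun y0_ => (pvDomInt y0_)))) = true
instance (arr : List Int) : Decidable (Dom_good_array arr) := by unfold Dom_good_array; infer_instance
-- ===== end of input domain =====

-- B replaces A's global top-two-maximum trick with a suffix-max table plus a running
-- prefix-max (alternative decomposition, same O(n) cost).


-- ===== PORT A =====
-- float('-inf') is modelled by `none : Option Int`; Python's `num > m` against -inf is
-- `true`, `num == m` against -inf is `false`, and `rem == 2 * -inf` is `false`.
def topTwoStep : Option Int × Option Int → Int → Option Int × Option Int
  | (m1, m2), num =>
    if (match m1 with | none => true | some a => decide (a < num)) then (some num, m1)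
    else if (match m2 with | none => true | some a => decide (a < num)) then (m1, some num)
    else (m1, m2)

def aLoop (total : Int) (m1 m2 : Option Int) : Int → List Int → List Int
  | _, [] => []
  | i, num :: rest =>
    let maxEl := if some num = m1 then m2 else m1
    (if (match maxEl with | none => false | some m => decide (total - num = 2 * m)) then [i + 1] else [])
      ++ aLoop total m1 m2 (i + 1) rest

def good_array (arr : List Int) : List Int :=
  match arr with
  | [] => []
  | _ =>
    let total := arr.foldl (· + ·) 0
    let p := arr.foldl topTwoStep (none, none)
    aLoop total p.1 p.2 0 arr

-- ===== PORT B =====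
def omax2 : Option Int → Option Int → Option Int
  | none, b => b
  | some a, none => some a
  | some a, some b => some (max a b)

-- the suffix-max table, built right-to-left and zipped with the elements:
-- each element is paired with max(arr[i+1:]) (none = -inf past the end)
def withSuffix : List Int → List (Int × Option Int)
  | [] => []
  | x :: xs =>
    let w := withSuffix xs
    (x, match w with | [] => none | (y, s) :: _ => omax2 (some y) s) :: w

def bLoop (total : Int) : Option Int → Int → List (Int × Option Int) → List Int
  | _, _, [] => []
  | pre, i, (num, sm) :: rest =>
    let m := omax2 pre sm
    (if (match m with | none => false | some mv => decide (total - num = 2 * mv)) then [i + 1] else [])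
      ++ bLoop total (omax2 pre (some num)) (i + 1) rest

def good_array_alt (arr : List Int) : List Int :=
  bLoop (arr.foldl (· + ·) 0) none 0 (withSuffix arr)

-- ===== PRECONDITION & SPEC =====
def Spec_good_array (arr : List Int) (out : List Int) : Prop := out = good_array_alt arr
instance (arr : List Int) (out : List Int) : Decidable (Spec_good_array arr out) := by unfold Spec_good_array; infer_instance

-- ===== CLAIM (what is proved, stated in full; the proofs are below) =====
def Claim_equal_good_array : Prop := ∀ (arr : List Int), Dom_good_array arr → Spec_good_array arr (good_array arr)

-- ===== LEMMAS AND PROOFS =====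

-- proof-only spec of the maximum of a list (none = empty)
def maxOf : List Int → Option Int
  | [] => none
  | x :: xs => omax2 (some x) (maxOf xs)

-- spec of A's second maximum: max of the list with one occurrence of the max removed
def m2spec (l : List Int) : Option Int :=
  match maxOf l with
  | none => none
  | some m => maxOf (l.erase m)

theorem omax2_assoc (a b c : Option Int) : omax2 (omax2 a b) c = omax2 a (omax2 b c) := by
  cases a <;> cases b <;> cases c <;> simp [omax2, max_assoc]

theorem maxOf_append (l r : List Int) : maxOf (l ++ r) = omax2 (maxOf l) (maxOf r) := by
  induction l with
  | nil => simp [maxOf, omax2]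
  | cons x xs ih => simp [maxOf, ih, omax2_assoc]

theorem maxOf_eq_none (l : List Int) : maxOf l = none ↔ l = [] := by
  cases l with
  | nil => simp [maxOf]
  | cons x xs => simp only [maxOf]; cases maxOf xs <;> simp [omax2]

theorem maxOf_le (l : List Int) (m : Int) (h : maxOf l = some m) :
    ∀ x ∈ l, x ≤ m := by
  induction l generalizing m with
  | nil => simp [maxOf] at h
  | cons y ys ih =>
    intro x hx
    simp only [maxOf] at h
    cases hy : maxOf ys with
    | none =>
      rw [hy] at h; simp [omax2] at h; subst h
      have hnil : ys = [] := (maxOf_eq_none ys).1 hy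
      subst hnil
      simp at hx; omega
    | some b =>
      rw [hy] at h; simp [omax2] at h
      have h1 : y ≤ max y b := le_max_left _ _
      have h2 : b ≤ max y b := le_max_right _ _
      rcases List.mem_cons.1 hx with h' | h'
      · subst h'; omega
      · have := ih b hy x h'; omega

theorem maxOf_mem (l : List Int) (m : Int) (h : maxOf l = some m) : m ∈ l := by
  induction l generalizing m with
  | nil => simp [maxOf] at h
  | cons y ys ih =>
    simp only [maxOf] at h
    cases hy : maxOf ys with
    | none => rw [hy] at h; simp [omax2] at h; simp [h]
    | some b =>
      rw [hy] at h; simp [omax2] at h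
      rcases le_total y b with hle | hle
      · rw [max_eq_right hle] at h; exact List.mem_cons_of_mem _ (h ▸ ih b hy)
      · rw [max_eq_left hle] at h; simp [h]

theorem maxOf_eq_of_mem_of_le (l : List Int) (m : Int) (hm : m ∈ l)
    (hle : ∀ x ∈ l, x ≤ m) : maxOf l = some m := by
  cases h : maxOf l with
  | none =>
    exfalso
    rw [maxOf_eq_none] at h
    subst h; simp at hm
  | some b =>
    have h1 := maxOf_le l b h m hm
    have h2 := hle b (maxOf_mem l b h)
    have : b = m := le_antisymm h2 h1
    rw [this]

theorem omax2_some_absorb (s : List Int) (m : Int) (hle : ∀ x ∈ s, x ≤ m) :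
    omax2 (some m) (maxOf s) = some m := by
  cases h : maxOf s with
  | none => rfl
  | some b =>
    have := hle b (maxOf_mem s b h)
    simp [omax2, max_eq_left this]

theorem omax2_absorb_some (s : List Int) (m : Int) (hle : ∀ x ∈ s, x ≤ m) :
    omax2 (maxOf s) (some m) = some m := by
  cases h : maxOf s with
  | none => rfl
  | some b =>
    have := hle b (maxOf_mem s b h)
    simp [omax2, max_eq_right this]

-- the head suffix-max stored by withSuffix is maxOf of the list
theorem withSuffix_head (xs : List Int) :
    (match withSuffix xs with | [] => (none : Option Int) | (y, s) :: _ => omax2 (some y) s) = maxOf xs := by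
  induction xs with
  | nil => rfl
  | cons y ys ih => simp only [withSuffix, maxOf]; rw [← ih]

theorem withSuffix_cons (x : Int) (xs : List Int) :
    withSuffix (x :: xs) = (x, maxOf xs) :: withSuffix xs := by
  simp only [withSuffix]
  rw [withSuffix_head]

-- characterization of A's top-two fold
theorem topTwo_spec (l : List Int) :
    l.foldl topTwoStep (none, none) = (maxOf l, m2spec l) := by
  induction l using List.reverseRecOn with
  | nil => rfl
  | append_singleton l x ih =>
    rw [List.foldl_append, ih, List.foldl_cons, List.foldl_nil]
    have hApp : maxOf (l ++ [x]) = omax2 (maxOf l) (some x) := by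
      rw [maxOf_append]; rfl
    cases hM1 : maxOf l with
    | none =>
      have hl : l = [] := (maxOf_eq_none l).1 hM1
      subst hl
      simp [topTwoStep, m2spec, maxOf, omax2, List.erase_cons_head]
    | some a =>
      rw [hM1] at hApp
      by_cases hax : a < x
      · -- new global max
        have hxl : x ∉ l := fun hx => absurd (maxOf_le l a hM1 x hx) (by omega)
        have hmax : maxOf (l ++ [x]) = some x := by
          rw [hApp]; simp [omax2, max_eq_right (le_of_lt hax)]
        simp only [topTwoStep, decide_eq_true_eq]
        rw [if_pos hax]
        have herase : (l ++ [x]).erase x = l := by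
          rw [List.erase_append_right _ hxl, List.erase_cons_head, List.append_nil]
        simp [m2spec, hmax, herase, hM1]
      · -- max unchanged; compare against second max
        have hxa : x ≤ a := by omega
        have hal : a ∈ l := maxOf_mem l a hM1
        have hmax : maxOf (l ++ [x]) = some a := by
          rw [hApp]; simp [omax2, max_eq_left hxa]
        have herase : (l ++ [x]).erase a = l.erase a ++ [x] :=
          List.erase_append_left _ hal
        have hm2 : m2spec (l ++ [x]) = omax2 (m2spec l) (some x) := by
          simp only [m2spec, hmax, hM1, herase, maxOf_append]
          rfl
        simp only [topTwoStep, decide_eq_true_eq]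
        rw [if_neg hax]
        cases hM2 : m2spec l with
        | none => simp [hmax, hm2, hM2, omax2]
        | some b =>
          by_cases hbx : b < x
          · simp [hmax, hm2, hM2, omax2, max_eq_right (le_of_lt hbx), hbx]
          · have : x ≤ b := by omega
            simp [hmax, hm2, hM2, omax2, max_eq_left this, hbx]

-- per-element: A's chosen "max of the rest" equals prefix-max ⊔ suffix-max
theorem main_eq (l : List Int) (num : Int) (r : List Int) :
    (if some num = maxOf (l ++ num :: r) then m2spec (l ++ num :: r)
     else maxOf (l ++ num :: r)) = omax2 (maxOf l) (maxOf r) := by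
  have harr : maxOf (l ++ num :: r) = omax2 (maxOf l) (omax2 (some num) (maxOf r)) := by
    rw [maxOf_append]; rfl
  by_cases hc : some num = maxOf (l ++ num :: r)
  · rw [if_pos hc]
    have hle : ∀ x ∈ l ++ num :: r, x ≤ num := maxOf_le _ num hc.symm
    have hleL : ∀ x ∈ l, x ≤ num := fun x hx => hle x (List.mem_append_left _ hx)
    have hleR : ∀ x ∈ r, x ≤ num := fun x hx =>
      hle x (List.mem_append_right _ (List.mem_cons_of_mem _ hx))
    simp only [m2spec, ← hc]
    by_cases hnl : num ∈ l
    · have herase : (l ++ num :: r).erase num = l.erase num ++ num :: r :=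
        List.erase_append_left _ hnl
      have hleE : ∀ x ∈ l.erase num, x ≤ num := fun x hx => hleL x (List.mem_of_mem_erase hx)
      rw [herase, maxOf_append]
      have h1 : maxOf (num :: r) = some num := by
        simp only [maxOf]; exact omax2_some_absorb r num hleR
      rw [h1, omax2_absorb_some _ _ hleE]
      rw [maxOf_eq_of_mem_of_le l num hnl hleL, omax2_some_absorb r num hleR]
    · have herase : (l ++ num :: r).erase num = l ++ r := by
        rw [List.erase_append_right _ hnl, List.erase_cons_head]
      rw [herase, maxOf_append]
  · rw [if_neg hc]
    -- the max is attained away from this occurrence of num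
    cases hM : maxOf (l ++ num :: r) with
    | none => cases hMl : maxOf l <;> cases hMr : maxOf r <;>
        rw [hMl, hMr] at harr <;> simp [omax2] at harr <;> simp_all
    | some M =>
      have hMnum : M ≠ num := fun h => hc (by rw [hM, h])
      have hmem := maxOf_mem _ M hM
      have hle := maxOf_le _ M hM
      have hmem' : M ∈ l ++ r := by
        rcases List.mem_append.1 hmem with h | h
        · exact List.mem_append_left _ h
        · rcases List.mem_cons.1 h with h | h
          · exact absurd h hMnum
          · exact List.mem_append_right _ h
      have hle' : ∀ x ∈ l ++ r, x ≤ M := by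
        intro x hx
        rcases List.mem_append.1 hx with h | h
        · exact hle x (List.mem_append_left _ h)
        · exact hle x (List.mem_append_right _ (List.mem_cons_of_mem _ h))
      rw [← maxOf_append, maxOf_eq_of_mem_of_le _ M hmem' hle']

theorem loop_eq (r : List Int) : ∀ (l : List Int) (total i : Int),
    aLoop total (maxOf (l ++ r)) (m2spec (l ++ r)) i r = bLoop total (maxOf l) i (withSuffix r) := by
  induction r with
  | nil => intro l total i; rfl
  | cons num r' ih =>
    intro l total i
    rw [withSuffix_cons]
    simp only [aLoop, bLoop]
    rw [main_eq l num r']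
    congr 1
    have hassoc : l ++ num :: r' = (l ++ [num]) ++ r' := by simp
    have hpre : maxOf (l ++ [num]) = omax2 (maxOf l) (some num) := by
      rw [maxOf_append]; rfl
    rw [hassoc, ih (l ++ [num]) total (i + 1), hpre]

-- ===== VERDICT (by name: the statement is the Claim_ definition above) =====
theorem good_array_spec : Claim_equal_good_array := by
  intro arr _
  unfold Spec_good_array
  cases arr with
  | nil => rfl
  | cons x xs =>
    show aLoop _ _ _ 0 (x :: xs) = _
    rw [topTwo_spec]
    have := loop_eq (x :: xs) [] (List.foldl (· + ·) 0 (x :: xs)) 0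
    simpa [good_array_alt, maxOf] using this
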